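-- pv_equiv track=rewrite | github.com/some1mine/boj | 프로그래머스/lv2/389480. 완전범죄/완전범죄.py | solution
-- ===== SOURCE A (Python) =====
-- def solution(info, n, m):
--     arr = [0] + [121 for _ in range(n - 1)]
--     for inf in info:
--         for i in range(n - 1, -1, -1):
--             arr[i] += inf[1]
--             if i >= inf[0]: arr[i] = min(arr[i], arr[i - inf[0]])
--     for i in range(n):
--         if arr[i] < m: return i
--     return -1
-- ===== SOURCE B (Python) =====
-- def solution(info, n, m):
--     # Budget-major DP with early exit: build one column of min-B-trace values per
--     # A-budget i (column i only needs earlier columns), returning at the first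
--     # affordable budget instead of completing the whole table item by item.
--     cols = []
--     for i in range(n):
--         col = [0 if i == 0 else 121]
--         for j in range(len(info)):
--             a, b = info[j][0], info[j][1]
--             best = col[j] + b
--             if a <= i:
--                 best = min(best, cols[i - a][j])
--             col.append(best)
--         cols.append(col)
--         if col[-1] < m:
--             return i
--     return -1
-- ===== Notes on version B (the rewrite author's own statement) =====
-- stated objective: alternative
-- what changed: A sweeps item-by-item over a single in-place 1-D array (descending budgets, full n-slot table, then a final scan); B is budget-major: it grows a 2-D table one budget-column at a time, each column computed from earlier columns, and returns at the first affordable budget without ever touching larger budgets.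
-- outside the precondition, e.g. on solution([[0, 1]], 1, 1): A returns -1, B raises IndexError
import Mathlib
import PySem

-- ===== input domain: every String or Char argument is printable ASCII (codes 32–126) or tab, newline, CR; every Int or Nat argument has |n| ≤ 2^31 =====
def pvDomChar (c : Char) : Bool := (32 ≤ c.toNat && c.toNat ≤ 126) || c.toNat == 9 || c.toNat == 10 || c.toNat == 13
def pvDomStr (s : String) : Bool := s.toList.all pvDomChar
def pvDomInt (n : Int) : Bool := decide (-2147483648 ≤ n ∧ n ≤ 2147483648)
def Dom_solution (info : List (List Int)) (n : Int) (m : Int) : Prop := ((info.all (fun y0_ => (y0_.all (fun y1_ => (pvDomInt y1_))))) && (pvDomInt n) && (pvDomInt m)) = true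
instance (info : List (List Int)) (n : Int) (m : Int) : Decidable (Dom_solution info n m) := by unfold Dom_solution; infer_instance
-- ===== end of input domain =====

-- B replaces A's item-major in-place 1-D knapsack sweep by a budget-major DP that
-- builds one column per A-budget and returns at the first affordable budget
-- (alternative decomposition; not claimed faster).

-- ===== PORT A =====
-- body of A's inner 'for i in range(n-1, -1, -1)' loop
def aInner (inf : List Int) (arr : List Int) (i : Int) : List Int :=
  let arr1 := PySem.List.pySetD arr i (PySem.List.pyGetD arr i 0 + PySem.List.pyGetD inf 1 0)
  if PySem.List.pyGetD inf 0 0 ≤ i then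
    PySem.List.pySetD arr1 i (min (PySem.List.pyGetD arr1 i 0)
      (PySem.List.pyGetD arr1 (i - PySem.List.pyGetD inf 0 0) 0))
  else arr1

def solution (info : List (List Int)) (n : Int) (m : Int) : Int :=
  let arr0 : List Int := [0] ++ (PySem.List.pyRange 0 (n-1) 1).map (fun _ => (121 : Int))
  let arr := info.foldl (fun arr inf =>
    (PySem.List.pyRange (n-1) (-1) (-1)).foldl (aInner inf) arr) arr0
  ((PySem.List.pyRange 0 n 1).foldl (fun res i =>
      match res with
      | some r => some r
      | none => if PySem.List.pyGetD arr i 0 < m then some i else none) none).getD (-1)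

-- ===== PORT B =====
-- column of min-B-trace values for A-budget i (Source B's inner 'for j' loop)
def bCol (info : List (List Int)) (cols : List (List Int)) (i : Int) : List Int :=
  (PySem.List.pyRange 0 (info.length : Int) 1).foldl (fun col j =>
    let a := PySem.List.pyGetD (PySem.List.pyGetD info j []) 0 0
    let b := PySem.List.pyGetD (PySem.List.pyGetD info j []) 1 0
    let best := PySem.List.pyGetD col j 0 + b
    let best := if a ≤ i then
        min best (PySem.List.pyGetD (PySem.List.pyGetD cols (i - a) []) j 0)
      else best
    col ++ [best]) [if i == 0 then (0 : Int) else 121]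

-- body of Source B's outer 'for i in range(n)' loop (early return carried as .2)
def bStep (info : List (List Int)) (m : Int) (st : List (List Int) × Option Int) (i : Int) :
    List (List Int) × Option Int :=
  match st.2 with
  | some _ => st
  | none =>
    let col := bCol info st.1 i
    (st.1 ++ [col], if PySem.List.pyGetD col (-1) 0 < m then some i else none)

def solution_alt (info : List (List Int)) (n : Int) (m : Int) : Int :=
  ((PySem.List.pyRange 0 n 1).foldl (bStep info m) ([], none)).2.getD (-1)

-- ===== PRECONDITION & SPEC =====
-- Pre_ excludes (for n ≥ 1) rows shorter than 2 and rows with negative A-cost, on which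
-- A raises IndexError, and rows with A-cost 0, where A's in-place update aliases
-- arr[i] with itself (a corner outside the puzzle's cost ≥ 1 constraints) and B's
-- lookup of the not-yet-built current column raises IndexError.
def Pre_solution (info : List (List Int)) (n : Int) (m : Int) : Prop :=
  n ≤ 0 ∨ ∀ row ∈ info, 2 ≤ row.length ∧ 1 ≤ PySem.List.pyGetD row 0 0
instance (info : List (List Int)) (n : Int) (m : Int) : Decidable (Pre_solution info n m) := by
  unfold Pre_solution; infer_instance

def pvWitness_solution : List (List Int) × Int × Int := ([[2, 3], [1, 1]], 4, 3)

def Spec_solution (info : List (List Int)) (n : Int) (m : Int) (out : Int) : Prop := out = solution_alt info n m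
instance (info : List (List Int)) (n : Int) (m : Int) (out : Int) : Decidable (Spec_solution info n m out) := by unfold Spec_solution; infer_instance

-- ===== CLAIM (what is proved, stated in full; the proofs are below) =====
def Claim_equal_solution : Prop := ∀ (info : List (List Int)) (n : Int) (m : Int), Dom_solution info n m → Pre_solution info n m → Spec_solution info n m (solution info n m)

-- ===== LEMMAS AND PROOFS =====

-- pure value of one knapsack row update (what both loops compute per item)
def rowP (inf old : List Int) : List Int :=
  (List.range old.length).map (fun (p : Nat) =>
    if PySem.List.pyGetD inf 0 0 ≤ (p : Int) then
      min (old.getD p 0 + PySem.List.pyGetD inf 1 0)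
        (old.getD ((p : Int) - PySem.List.pyGetD inf 0 0).toNat 0)
    else old.getD p 0 + PySem.List.pyGetD inf 1 0)

-- DP table row after the first j items, over budgets 0..N-1
def dpRows (info : List (List Int)) (N : Nat) (j : Nat) : List Int :=
  (info.take j).foldl (fun r inf => rowP inf r)
    ((List.range N).map (fun p => if p = 0 then (0 : Int) else 121))

def dpv (info : List (List Int)) (N : Nat) (j p : Nat) : Int := (dpRows info N j).getD p 0

theorem length_rowP (inf old : List Int) : (rowP inf old).length = old.length := by
  simp [rowP]

theorem getD_rowP (inf old : List Int) (p : Nat) (hp : p < old.length) :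
    (rowP inf old).getD p 0 =
      if PySem.List.pyGetD inf 0 0 ≤ (p : Int) then
        min (old.getD p 0 + PySem.List.pyGetD inf 1 0)
          (old.getD ((p : Int) - PySem.List.pyGetD inf 0 0).toNat 0)
      else old.getD p 0 + PySem.List.pyGetD inf 1 0 := by
  unfold rowP
  rw [List.getD_eq_getElem?_getD]
  simp [hp]

theorem length_foldl_rowP (l : List (List Int)) :
    ∀ (R : List Int), (l.foldl (fun r inf => rowP inf r) R).length = R.length := by
  induction l with
  | nil => intro R; rfl
  | cons x xs ih => intro R; rw [List.foldl_cons, ih, length_rowP]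

theorem length_dpRows (info : List (List Int)) (N j : Nat) : (dpRows info N j).length = N := by
  unfold dpRows; rw [length_foldl_rowP]; simp

theorem dpRows_succ (info : List (List Int)) (N j : Nat) (hj : j < info.length) :
    dpRows info N (j+1) = rowP (info.getD j []) (dpRows info N j) := by
  unfold dpRows
  rw [List.take_add_one, List.foldl_append]
  have : info[j]? = some (info.getD j []) := by
    rw [List.getElem?_eq_getElem hj, List.getD_eq_getElem _ _ hj]
  rw [this]
  rfl

theorem dpv_zero (info : List (List Int)) (N p : Nat) (hp : p < N) :
    dpv info N 0 p = if p = 0 then 0 else 121 := by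
  unfold dpv dpRows
  rw [List.take_zero, List.foldl_nil, List.getD_eq_getElem?_getD]
  simp [hp]

theorem dpv_succ (info : List (List Int)) (N j p : Nat) (hj : j < info.length) (hp : p < N) :
    dpv info N (j+1) p =
      if PySem.List.pyGetD (info.getD j []) 0 0 ≤ (p : Int) then
        min (dpv info N j p + PySem.List.pyGetD (info.getD j []) 1 0)
          (dpv info N j ((p : Int) - PySem.List.pyGetD (info.getD j []) 0 0).toNat)
      else dpv info N j p + PySem.List.pyGetD (info.getD j []) 1 0 := by
  unfold dpv
  rw [dpRows_succ info N j hj, getD_rowP _ _ p (by rw [length_dpRows]; exact hp)]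

-- A's descending in-place sweep over one item computes rowP
theorem aLoop (inf old : List Int) (N : Nat) (hN : old.length = N)
    (ha : 1 ≤ PySem.List.pyGetD inf 0 0) :
    ∀ (t : Nat) (cur : List Int), t ≤ N → cur.length = N →
      (∀ q, q < t → cur.getD q 0 = old.getD q 0) →
      (∀ q, t ≤ q → q < N → cur.getD q 0 = (rowP inf old).getD q 0) →
      (PySem.List.pyRange ((t : Int) - 1) (-1) (-1)).foldl (aInner inf) cur = rowP inf old := by
  intro t
  induction t with
  | zero =>
    intro cur _ hlen h1 h2
    rw [show ((0 : Nat) : Int) - 1 = -1 by norm_num,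
      PySem.List.pyRange_neg_one_eq_nil le_rfl, List.foldl_nil]
    apply List.ext_getElem (by rw [hlen, length_rowP, hN])
    intro q hq1 hq2
    have hqN : q < N := by rwa [hlen] at hq1
    have := h2 q (Nat.zero_le q) hqN
    rwa [List.getD_eq_getElem _ _ hq1, List.getD_eq_getElem _ _ hq2] at this
  | succ t ih =>
    intro cur ht hlen h1 h2
    have htN : t < N := by omega
    have htlen : t < cur.length := by omega
    have hc : ((t + 1 : Nat) : Int) - 1 = (t : Int) := by push_cast; ring
    have hform : aInner inf cur (t : Int) = cur.set t ((rowP inf old).getD t 0) := by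
      have hval : (rowP inf old).getD t 0 =
          if PySem.List.pyGetD inf 0 0 ≤ (t : Int) then
            min (old.getD t 0 + PySem.List.pyGetD inf 1 0)
              (old.getD ((t : Int) - PySem.List.pyGetD inf 0 0).toNat 0)
          else old.getD t 0 + PySem.List.pyGetD inf 1 0 :=
        getD_rowP inf old t (by omega)
      by_cases ha2 : PySem.List.pyGetD inf 0 0 ≤ (t : Int)
      · have h0a : (0 : Int) ≤ (t : Int) - PySem.List.pyGetD inf 0 0 := by omega
        have hq0 : (((t : Int) - PySem.List.pyGetD inf 0 0).toNat : Int) =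
            (t : Int) - PySem.List.pyGetD inf 0 0 := Int.toNat_of_nonneg h0a
        have hq0t : ((t : Int) - PySem.List.pyGetD inf 0 0).toNat ≠ t := by omega
        simp only [aInner, if_pos ha2]
        rw [show (t : Int) - PySem.List.pyGetD inf 0 0 =
            ((((t : Int) - PySem.List.pyGetD inf 0 0).toNat : Nat) : Int) from hq0.symm]
        rw [PySem.List.pyGetD_pySetD_natCast cur t t _ _ htlen,
          PySem.List.pyGetD_pySetD_natCast cur t _ _ _ htlen]
        rw [if_pos rfl, if_neg hq0t]
        rw [PySem.List.pySetD_natCast, PySem.List.pySetD_natCast, List.set_set]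
        rw [PySem.List.pyGetD_natCast, PySem.List.pyGetD_natCast]
        rw [h1 t (by omega), h1 _ (by omega)]
        rw [hval, if_pos ha2]
      · simp only [aInner, if_neg ha2]
        rw [PySem.List.pySetD_natCast, PySem.List.pyGetD_natCast, h1 t (by omega)]
        rw [hval, if_neg ha2]
    have hgq : ∀ q : Nat, (aInner inf cur (t : Int)).getD q 0 =
        if q = t then (rowP inf old).getD q 0 else cur.getD q 0 := by
      intro q
      rw [hform, List.getD_eq_getElem?_getD, List.getElem?_set]
      by_cases hq : q = t
      · subst hq; simp [htlen, List.getD_eq_getElem?_getD]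
      · simp [Ne.symm hq, hq, List.getD_eq_getElem?_getD]
    rw [hc, PySem.List.pyRange_neg_one_cons (by omega : (-1 : Int) < (t : Int)),
      List.foldl_cons]
    apply ih (aInner inf cur (t : Int)) (by omega)
      (by rw [hform, List.length_set, hlen])
    · intro q hq
      rw [hgq q, if_neg (by omega)]
      exact h1 q (by omega)
    · intro q hq1 hq2
      rcases Nat.eq_or_lt_of_le hq1 with hq | hq
      · rw [hgq q, if_pos hq.symm]
      · rw [hgq q, if_neg (by omega)]
        exact h2 q (by omega) hq2

-- A's whole item loop is the pure fold of rowP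
theorem aFold (info : List (List Int)) (N : Nat)
    (ha : ∀ row ∈ info, 1 ≤ PySem.List.pyGetD row 0 0) :
    ∀ (R : List Int), R.length = N →
      info.foldl (fun arr inf =>
          (PySem.List.pyRange ((N : Int) - 1) (-1) (-1)).foldl (aInner inf) arr) R =
        info.foldl (fun r inf => rowP inf r) R := by
  induction info with
  | nil => intro R _; rfl
  | cons inf rest ih =>
    intro R hR
    rw [List.foldl_cons, List.foldl_cons]
    have h1 : (PySem.List.pyRange ((N : Int) - 1) (-1) (-1)).foldl (aInner inf) R =
        rowP inf R := by
      apply aLoop inf R N hR (ha inf (by simp)) N R le_rfl hR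
      · intro q hq; rfl
      · intro q hq1 hq2; omega
    rw [h1]
    exact ih (fun row hr => ha row (by simp [hr])) (rowP inf R) (by rw [length_rowP, hR])

-- a first-hit scan stays at its first hit
theorem scan_some (P : Int → Prop) [DecidablePred P] (l : List Int) (r : Int) :
    l.foldl (fun res i =>
      match res with
      | some r' => some r'
      | none => if P i then some i else none) (some r) = some r := by
  induction l with
  | nil => rfl
  | cons x xs ih => simpa using ih

theorem scanA (P : Int → Prop) [DecidablePred P] (N : Nat) :
    ∀ (d t : Nat), t + d = N →
      (PySem.List.pyRange (t : Int) (N : Int) 1).foldl (fun res i =>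
        match res with
        | some r' => some r'
        | none => if P i then some i else none) none =
      ((List.range' t d).find? (fun (p : Nat) => decide (P (p : Int)))).map (fun (p : Nat) => (p : Int)) := by
  intro d
  induction d with
  | zero =>
    intro t ht
    have htN : t = N := by omega
    subst htN
    rw [PySem.List.pyRange_one_eq_nil le_rfl]
    rfl
  | succ d ih =>
    intro t ht
    have hlt : (t : Int) < (N : Int) := by exact_mod_cast by omega
    rw [PySem.List.pyRange_one_cons hlt, List.foldl_cons, List.range'_succ, List.find?_cons]
    by_cases hP : P (t : Int)
    · simp only [if_pos hP]
      rw [scan_some]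
      simp [hP]
    · simp only [if_neg hP]
      have : (t : Int) + 1 = ((t + 1 : Nat) : Int) := by push_cast; ring
      rw [this, ih (t + 1) (by omega)]
      simp [hP]

theorem bStep_some (info : List (List Int)) (m : Int) (l : List Int)
    (st : List (List Int) × Option Int) (r : Int) (h : st.2 = some r) :
    l.foldl (bStep info m) st = st := by
  induction l generalizing st with
  | nil => rfl
  | cons x xs ih =>
    have : bStep info m st x = st := by
      unfold bStep; rw [h]
    rw [List.foldl_cons, this, ih st h]

-- the columns built so far (budgets 0..t-1)
def colsOf (info : List (List Int)) (N t : Nat) : List (List Int) :=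
  (List.range t).map (fun p => (List.range (info.length + 1)).map (fun j => dpv info N j p))

-- the loop body of bCol, named for the proofs
def bBody (info : List (List Int)) (cols : List (List Int)) (i : Int)
    (col : List Int) (j : Int) : List Int :=
  let a := PySem.List.pyGetD (PySem.List.pyGetD info j []) 0 0
  let b := PySem.List.pyGetD (PySem.List.pyGetD info j []) 1 0
  let best := PySem.List.pyGetD col j 0 + b
  let best := if a ≤ i then
      min best (PySem.List.pyGetD (PySem.List.pyGetD cols (i - a) []) j 0)
    else best
  col ++ [best]

theorem bCol_eq_foldl (info cols : List (List Int)) (i : Int) :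
    bCol info cols i = (PySem.List.pyRange 0 (info.length : Int) 1).foldl
      (bBody info cols i) [if i == 0 then (0 : Int) else 121] := rfl

theorem pyGetD_append_neg_one (l : List Int) (x d : Int) :
    PySem.List.pyGetD (l ++ [x]) (-1) d = x := by
  simp [PySem.List.pyGetD, PySem.List.pyGet?, PySem.List.pyIdx?]

theorem bColAux (info : List (List Int)) (N t : Nat) (ht : t < N)
    (ha : ∀ row ∈ info, 1 ≤ PySem.List.pyGetD row 0 0) :
    ∀ (d j : Nat), j + d = info.length →
      (PySem.List.pyRange (j : Int) (info.length : Int) 1).foldl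
        (bBody info (colsOf info N t) (t : Int))
        ((List.range (j + 1)).map (fun jj => dpv info N jj t)) =
      (List.range (info.length + 1)).map (fun jj => dpv info N jj t) := by
  intro d
  induction d with
  | zero =>
    intro j hj
    have hjk : j = info.length := by omega
    subst hjk
    rw [PySem.List.pyRange_one_eq_nil le_rfl, List.foldl_nil]
  | succ d ih =>
    intro j hj
    have hjk : j < info.length := by omega
    rw [PySem.List.pyRange_one_cons (by exact_mod_cast hjk), List.foldl_cons]
    have hrow : PySem.List.pyGetD info (j : Int) [] = info.getD j [] :=
      PySem.List.pyGetD_natCast info j []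
    have hmem : info.getD j [] ∈ info := by
      rw [List.getD_eq_getElem _ _ hjk]; exact List.getElem_mem hjk
    have ha1 : 1 ≤ PySem.List.pyGetD (info.getD j []) 0 0 := ha _ hmem
    have hcolj : PySem.List.pyGetD
        ((List.range (j + 1)).map (fun jj => dpv info N jj t)) (j : Int) 0 =
        dpv info N j t := by
      rw [PySem.List.pyGetD_natCast, List.getD_eq_getElem?_getD]
      simp
    have hstep : bBody info (colsOf info N t) (t : Int)
        ((List.range (j + 1)).map (fun jj => dpv info N jj t)) (j : Int) =
        (List.range (j + 1 + 1)).map (fun jj => dpv info N jj t) := by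
      simp only [bBody, hrow, hcolj]
      have hbest : (if PySem.List.pyGetD (info.getD j []) 0 0 ≤ (t : Int) then
          min (dpv info N j t + PySem.List.pyGetD (info.getD j []) 1 0)
            (PySem.List.pyGetD (PySem.List.pyGetD (colsOf info N t)
              ((t : Int) - PySem.List.pyGetD (info.getD j []) 0 0) []) (j : Int) 0)
        else dpv info N j t + PySem.List.pyGetD (info.getD j []) 1 0) =
          dpv info N (j + 1) t := by
        by_cases ha2 : PySem.List.pyGetD (info.getD j []) 0 0 ≤ (t : Int)
        · rw [if_pos ha2]
          have h0a : (0 : Int) ≤ (t : Int) - PySem.List.pyGetD (info.getD j []) 0 0 := by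
            omega
          have hq0 : ((((t : Int) - PySem.List.pyGetD (info.getD j []) 0 0).toNat : Nat) :
              Int) = (t : Int) - PySem.List.pyGetD (info.getD j []) 0 0 :=
            Int.toNat_of_nonneg h0a
          have hq0t : ((t : Int) - PySem.List.pyGetD (info.getD j []) 0 0).toNat < t := by
            omega
          rw [← hq0, PySem.List.pyGetD_natCast (colsOf info N t) _ []]
          have hcols : (colsOf info N t).getD
              (((t : Int) - PySem.List.pyGetD (info.getD j []) 0 0).toNat) [] =
              (List.range (info.length + 1)).map
                (fun jj => dpv info N jj
                  (((t : Int) - PySem.List.pyGetD (info.getD j []) 0 0).toNat)) := by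
            unfold colsOf
            rw [List.getD_eq_getElem?_getD, List.getElem?_map, List.getElem?_range hq0t]
            rfl
          rw [hcols, PySem.List.pyGetD_natCast,
            PySem.List.getD_map_range _ _ _ _ (by omega : j < info.length + 1)]
          rw [dpv_succ info N j t hjk ht, if_pos ha2]
        · rw [if_neg ha2, dpv_succ info N j t hjk ht, if_neg ha2]
      rw [hbest, List.range_succ (n := j + 1), List.map_append]
      rfl
    rw [hstep, show ((j : Int) + 1) = ((j + 1 : Nat) : Int) by push_cast; ring]
    exact ih (j + 1) (by omega)

-- B's inner loop builds the pure DP column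
theorem bColEq (info : List (List Int)) (N t : Nat) (ht : t < N)
    (ha : ∀ row ∈ info, 1 ≤ PySem.List.pyGetD row 0 0) :
    bCol info (colsOf info N t) (t : Int) =
      (List.range (info.length + 1)).map (fun j => dpv info N j t) := by
  rw [bCol_eq_foldl]
  have hcol0 : [if ((t : Nat) : Int) == 0 then (0 : Int) else 121] =
      (List.range (0 + 1)).map (fun jj => dpv info N jj t) := by
    simp only [Nat.zero_add, List.range_one, List.map_cons, List.map_nil]
    rw [dpv_zero info N t ht]
    cases t with
    | zero => simp
    | succ t' =>
      rw [if_neg (by simp only [beq_iff_eq]; omega), if_neg (by omega)]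
  rw [hcol0, show (0 : Int) = ((0 : Nat) : Int) by norm_num]
  exact bColAux info N t ht ha info.length 0 (by omega)

-- B's outer loop finds the first affordable budget
theorem bLoop (info : List (List Int)) (N : Nat) (m : Int)
    (ha : ∀ row ∈ info, 1 ≤ PySem.List.pyGetD row 0 0) :
    ∀ (d t : Nat), t + d = N →
      ((PySem.List.pyRange (t : Int) (N : Int) 1).foldl (bStep info m) (colsOf info N t, none)).2 =
      ((List.range' t d).find? (fun p => decide (dpv info N info.length p < m))).map
        (fun (p : Nat) => (p : Int)) := by
  intro d
  induction d with
  | zero =>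
    intro t ht
    have htN : t = N := by omega
    subst htN
    rw [PySem.List.pyRange_one_eq_nil le_rfl]
    rfl
  | succ d ih =>
    intro t ht
    have htN : t < N := by omega
    rw [PySem.List.pyRange_one_cons (by exact_mod_cast htN), List.foldl_cons]
    have hcol := bColEq info N t htN ha
    have hstep : bStep info m (colsOf info N t, none) (t : Int) =
        (colsOf info N t ++ [(List.range (info.length + 1)).map (fun j => dpv info N j t)],
          if dpv info N info.length t < m then some (t : Int) else none) := by
      simp only [bStep, hcol]
      have hlast : PySem.List.pyGetD
          ((List.range (info.length + 1)).map (fun j => dpv info N j t)) (-1) 0 =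
          dpv info N info.length t := by
        rw [List.range_succ, List.map_append, List.map_singleton, pyGetD_append_neg_one]
      rw [hlast]
    rw [hstep]
    have hcols1 : colsOf info N t ++
        [(List.range (info.length + 1)).map (fun j => dpv info N j t)] =
        colsOf info N (t + 1) := by
      unfold colsOf
      rw [List.range_succ (n := t), List.map_append, List.map_singleton]
    rw [List.range'_succ, List.find?_cons]
    by_cases hhit : dpv info N info.length t < m
    · rw [if_pos hhit]
      rw [bStep_some info m _ _ (t : Int) rfl]
      simp [hhit]
    · rw [if_neg hhit]
      rw [hcols1, show ((t : Int) + 1) = ((t + 1 : Nat) : Int) by push_cast; ring,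
        ih (t + 1) (by omega)]
      simp [hhit]

-- ===== VERDICT (by name: the statement is the Claim_ definition above) =====
theorem row0_eq (n : Int) (N : Nat) (hNn : (N : Int) = n) (h1 : 1 ≤ n) :
    [(0 : Int)] ++ (PySem.List.pyRange 0 (n - 1) 1).map (fun _ => (121 : Int)) =
      (List.range N).map (fun p => if p = 0 then (0 : Int) else 121) := by
  rw [PySem.List.pyRange_one]
  apply List.ext_getElem
  · simp
    omega
  · intro q h1' h2'
    cases q with
    | zero => simp
    | succ q => simp

theorem solution_spec : Claim_equal_solution := by
  intro info n m _ hpre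
  unfold Spec_solution
  by_cases hn : n ≤ 0
  · simp only [solution, solution_alt, PySem.List.pyRange_one_eq_nil hn, List.foldl_nil]
  · push_neg at hn
    have hpre' : ∀ row ∈ info, 2 ≤ row.length ∧ 1 ≤ PySem.List.pyGetD row 0 0 := by
      rcases hpre with h | h
      · omega
      · exact h
    have ha : ∀ row ∈ info, 1 ≤ PySem.List.pyGetD row 0 0 := fun r hr => (hpre' r hr).2
    have hNn : ((n.toNat : Nat) : Int) = n := Int.toNat_of_nonneg (by omega)
    have harr0 := row0_eq n n.toNat hNn (by omega)
    have hAfold : info.foldl (fun arr inf =>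
        (PySem.List.pyRange (n - 1) (-1) (-1)).foldl (aInner inf) arr)
          ((List.range n.toNat).map (fun p => if p = 0 then (0 : Int) else 121)) =
        dpRows info n.toNat info.length := by
      rw [show (n - 1 : Int) = ((n.toNat : Nat) : Int) - 1 by omega]
      rw [aFold info n.toNat ha _ (by simp)]
      unfold dpRows
      rw [List.take_length]
    have hpred : (fun (p : Nat) =>
        decide (PySem.List.pyGetD (dpRows info n.toNat info.length) (p : Int) 0 < m)) =
        (fun (p : Nat) => decide (dpv info n.toNat info.length p < m)) := by
      funext p
      rw [PySem.List.pyGetD_natCast]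
      rfl
    have hA : solution info n m =
        ((((List.range' 0 n.toNat).find? (fun (p : Nat) =>
          decide (dpv info n.toNat info.length p < m))).map
            (fun (p : Nat) => (p : Int))).getD (-1)) := by
      simp only [solution]
      rw [harr0, hAfold]
      have hscan := scanA
        (fun i => PySem.List.pyGetD (dpRows info n.toNat info.length) i 0 < m)
        n.toNat n.toNat 0 (by omega)
      rw [Nat.cast_zero] at hscan
      rw [hNn] at hscan
      rw [hscan, hpred]
    have hB : solution_alt info n m =
        ((((List.range' 0 n.toNat).find? (fun (p : Nat) =>
          decide (dpv info n.toNat info.length p < m))).map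
            (fun (p : Nat) => (p : Int))).getD (-1)) := by
      simp only [solution_alt]
      have hloop := bLoop info n.toNat m ha n.toNat 0 (by omega)
      rw [Nat.cast_zero] at hloop
      rw [hNn] at hloop
      rw [show (([] : List (List Int)), (none : Option Int)) =
        (colsOf info n.toNat 0, (none : Option Int)) from rfl, hloop]
    rw [hA, hB]
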